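-- pv_equiv track=rewrite | github.com/SvendDahlgaard/GitHub-Documentation | BasicSectionCluster.py | create_section_index
-- ===== SOURCE A (Python) =====
-- from typing import List, Dict, Tuple, Set, Optional, Any
-- from collections import defaultdict
--
-- def create_section_index(sections: List[Tuple[str, Dict[str, str]]], analyses: Dict[str, str]) -> str:
--     """Create an index/directory of all analyzed sections with links."""
--     # Build a table of contents
--     toc_parts = ["# Repository Analysis Index\n\n"]
--     toc_parts.append("## Sections\n\n")
--
--     # Group sections by top-level directory
--     grouped_sections = defaultdict(list)
--     for section_name, _ in sections:
--         top_level = section_name.split('/')[0]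
--         grouped_sections[top_level].append(section_name)
--
--     # Add TOC entries for each group
--     for group, section_names in sorted(grouped_sections.items()):
--         toc_parts.append(f"### {group}\n\n")
--         for section_name in sorted(section_names):
--             # Get file count
--             _, files = next((s, f) for s, f in sections if s == section_name)
--             file_count = len(files)
--
--             # Create a sanitized anchor link
--             anchor = section_name.replace('/', '_').replace('.', '_').lower()
--             toc_parts.append(f"- [{section_name}](#{anchor}) ({file_count} files)\n")
--         toc_parts.append("\n")
--
--     # Add section analyses
--     toc_parts.append("## Analysis by Section\n\n")
--
--     for section_name, files in sections:
--         anchor = section_name.replace('/', '_').replace('.', '_').lower()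
--         toc_parts.append(f"<h3 id='{anchor}'>{section_name} ({len(files)} files)</h3>\n\n")
--
--         # List the files in this section
--         toc_parts.append("**Files:**\n\n")
--         for path in sorted(files.keys()):
--             toc_parts.append(f"- `{path}`\n")
--         toc_parts.append("\n")
--
--         # Add the analysis
--         if section_name in analyses:
--             toc_parts.append("**Analysis:**\n\n")
--             toc_parts.append(analyses[section_name])
--             toc_parts.append("\n\n---\n\n")
--         else:
--             toc_parts.append("*No analysis available for this section.*\n\n---\n\n")
--
--     return "".join(toc_parts)
-- ===== SOURCE B (Python) =====
-- from typing import List, Dict, Tuple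
--
--
-- def create_section_index(sections: List[Tuple[str, Dict[str, str]]], analyses: Dict[str, str]) -> str:
--     """Create an index/directory of all analyzed sections with links."""
--
--     def anchor(name: str) -> str:
--         return name.replace('/', '_').replace('.', '_').lower()
--
--     # First-occurrence files dict per section name (matches next(...) first-match).
--     first_files = {}
--     for name, files in sections:
--         first_files.setdefault(name, files)
--
--     # Sorted distinct top-level directories; per group, a sorted scan of the
--     # matching section names replaces the defaultdict bucketing.
--     groups = sorted({name.split('/')[0] for name, _ in sections})
--
--     toc = []
--     for g in groups:
--         toc.append(f"### {g}\n\n")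
--         toc.extend(
--             f"- [{n}](#{anchor(n)}) ({len(first_files[n])} files)\n"
--             for n in sorted(name for name, _ in sections if name.split('/')[0] == g)
--         )
--         toc.append("\n")
--
--     body = []
--     for name, files in sections:
--         body.append(f"<h3 id='{anchor(name)}'>{name} ({len(files)} files)</h3>\n\n")
--         body.append("**Files:**\n\n")
--         body.extend(f"- `{p}`\n" for p in sorted(files))
--         body.append("\n")
--         if name in analyses:
--             body.extend(["**Analysis:**\n\n", analyses[name], "\n\n---\n\n"])
--         else:
--             body.append("*No analysis available for this section.*\n\n---\n\n")
--
--     return ("# Repository Analysis Index\n\n## Sections\n\n"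
--             + "".join(toc)
--             + "## Analysis by Section\n\n"
--             + "".join(body))
-- ===== Notes on version B (the rewrite author's own statement) =====
-- stated objective: alternative
-- what changed: Replaces the defaultdict bucketing plus per-bucket sort and the next(...) scan with a sorted distinct-top-level pass: a first-occurrence files dict built once, a sorted set of top-level directories, and per group a sorted filter of the matching section names; the output is assembled from three joined parts instead of one growing list.
import Mathlib
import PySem

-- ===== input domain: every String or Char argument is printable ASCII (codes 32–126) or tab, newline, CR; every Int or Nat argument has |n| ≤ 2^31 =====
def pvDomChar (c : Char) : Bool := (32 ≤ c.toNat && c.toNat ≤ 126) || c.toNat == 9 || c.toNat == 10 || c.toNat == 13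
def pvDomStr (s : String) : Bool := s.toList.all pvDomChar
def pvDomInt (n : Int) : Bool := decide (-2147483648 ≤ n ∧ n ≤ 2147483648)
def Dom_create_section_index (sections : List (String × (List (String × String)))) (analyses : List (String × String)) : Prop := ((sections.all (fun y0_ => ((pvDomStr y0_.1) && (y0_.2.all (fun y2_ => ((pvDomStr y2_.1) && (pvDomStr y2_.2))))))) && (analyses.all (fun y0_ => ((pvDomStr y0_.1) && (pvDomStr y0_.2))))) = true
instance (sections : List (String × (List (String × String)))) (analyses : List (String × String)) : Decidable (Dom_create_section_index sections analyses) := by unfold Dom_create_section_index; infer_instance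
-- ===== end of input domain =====

-- B replaces A's defaultdict bucketing + per-bucket sort + next(...) scan by a sorted set of
-- top-level directories with a per-group sorted filter and a first-occurrence files dict
-- (objective: alternative, same cost).

-- helpers shared by both ports (both Pythons contain these identical subexpressions)
-- name.split('/')[0]: '/' is a nonempty separator, so split? is `some` of a nonempty list — exact
def pvTop (s : String) : String := ((PySem.Str.split? s "/").getD []).headD ""
-- name.replace('/', '_').replace('.', '_').lower()
def pvAnchor (s : String) : String :=
  PySem.Str.lower (PySem.Str.replace (PySem.Str.replace s "/" "_") "." "_")

-- ===== PORT A =====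
-- A's three loop bodies, named (each is the literal body of the corresponding Python loop)
def pvStepNameA (sections : List (String × (List (String × String)))) (acc : List String) (name : String) : List String :=
  -- next((s, f) for s, f in sections if s == section_name): first match; the name
  -- comes from sections so it always exists (the getD [] default is never consulted)
  let files := ((sections.find? (fun q => q.1 == name)).map (fun q => q.2)).getD []
  let file_count : Nat := (PySem.Dict.ofList files).size
  acc ++ ["- [" ++ name ++ "](#" ++ pvAnchor name ++ ") (" ++ PySem.Int.toStr (file_count : Int) ++ " files)\n"]

def pvStepGroupA (sections : List (String × (List (String × String)))) (acc : List String) (gp : String × List String) : List String :=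
  let acc := acc ++ ["### " ++ gp.1 ++ "\n\n"]
  let acc := (PySem.List.sorted gp.2 (fun x => x)).foldl (pvStepNameA sections) acc
  acc ++ ["\n"]

def pvStepSectionA (analysesD : PySem.Dict String String) (acc : List String) (p : String × List (String × String)) : List String :=
  let name := p.1
  let filesD := PySem.Dict.ofList p.2
  let acc := acc ++ ["<h3 id='" ++ pvAnchor name ++ "'>" ++ name ++ " (" ++ PySem.Int.toStr (filesD.size : Int) ++ " files)</h3>\n\n"]
  let acc := acc ++ ["**Files:**\n\n"]
  let acc := (PySem.List.sorted filesD.keys (fun x => x)).foldl (fun acc path => acc ++ ["- `" ++ path ++ "`\n"]) acc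
  let acc := acc ++ ["\n"]
  match analysesD.get? name with
  | some a => ((acc ++ ["**Analysis:**\n\n"]) ++ [a]) ++ ["\n\n---\n\n"]
  | none => acc ++ ["*No analysis available for this section.*\n\n---\n\n"]

def create_section_index (sections : List (String × (List (String × String)))) (analyses : List (String × String)) : String :=
  let toc0 : List String := ["# Repository Analysis Index\n\n"]
  let toc1 := toc0 ++ ["## Sections\n\n"]
  -- grouped_sections: defaultdict(list); grouped[top].append(section_name)
  let grouped : PySem.Dict String (List String) :=
    sections.foldl (fun d p => d.modify (pvTop p.1) [] (fun v => v ++ [p.1])) PySem.Dict.empty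
  -- sorted(grouped_sections.items()): dict keys are unique, so Python's tuple
  -- comparison on the items is decided by the first component — exact
  let toc2 := (PySem.List.sorted grouped.items (fun gp => gp.1)).foldl (pvStepGroupA sections) toc1
  let toc3 := toc2 ++ ["## Analysis by Section\n\n"]
  let toc4 := sections.foldl (pvStepSectionA (PySem.Dict.ofList analyses)) toc3
  PySem.Str.join "" toc4

-- ===== PORT B =====
-- the per-section block of B's "Analysis by Section" loop
def pvBlock (analysesD : PySem.Dict String String) (p : String × List (String × String)) : List String :=
  let name := p.1
  let filesD := PySem.Dict.ofList p.2
  ["<h3 id='" ++ pvAnchor name ++ "'>" ++ name ++ " (" ++ PySem.Int.toStr (filesD.size : Int) ++ " files)</h3>\n\n",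
   "**Files:**\n\n"]
  ++ (PySem.List.sorted filesD.keys (fun x => x)).map (fun pth => "- `" ++ pth ++ "`\n")
  ++ ["\n"]
  ++ (match analysesD.get? name with
      | some a => ["**Analysis:**\n\n", a, "\n\n---\n\n"]
      | none => ["*No analysis available for this section.*\n\n---\n\n"])

def create_section_index_alt (sections : List (String × (List (String × String)))) (analyses : List (String × String)) : String :=
  -- first_files.setdefault(name, files)
  let firstFiles : PySem.Dict String (List (String × String)) :=
    sections.foldl (fun d p => d.setdefault p.1 p.2) PySem.Dict.empty
  -- groups = sorted({name.split('/')[0] for name, _ in sections})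
  let groups := PySem.List.sorted (PySem.Set.ofList (sections.map (fun p => pvTop p.1))) (fun x => x)
  let toc : List String := groups.foldl (fun acc g =>
    acc ++ (["### " ++ g ++ "\n\n"]
      ++ (PySem.List.sorted ((sections.filter (fun p => pvTop p.1 == g)).map (fun p => p.1)) (fun x => x)).map
          (fun n => "- [" ++ n ++ "](#" ++ pvAnchor n ++ ") (" ++
            PySem.Int.toStr (((PySem.Dict.ofList ((firstFiles.get? n).getD [])).size : Nat) : Int) ++ " files)\n")
      ++ ["\n"])) []
  let analysesD := PySem.Dict.ofList analyses
  let body : List String := sections.foldl (fun acc p => acc ++ pvBlock analysesD p) []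
  "# Repository Analysis Index\n\n## Sections\n\n"
    ++ PySem.Str.join "" toc
    ++ "## Analysis by Section\n\n"
    ++ PySem.Str.join "" body

-- ===== PRECONDITION & SPEC =====
def Spec_create_section_index (sections : List (String × (List (String × String)))) (analyses : List (String × String)) (out : String) : Prop := out = create_section_index_alt sections analyses
instance (sections : List (String × (List (String × String)))) (analyses : List (String × String)) (out : String) : Decidable (Spec_create_section_index sections analyses out) := by unfold Spec_create_section_index; infer_instance

-- ===== CLAIM (what is proved, stated in full; the proofs are below) =====
def Claim_equal_create_section_index : Prop := ∀ (sections : List (String × (List (String × String)))) (analyses : List (String × String)), Dom_create_section_index sections analyses → Spec_create_section_index sections analyses (create_section_index sections analyses)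

-- ===== LEMMAS AND PROOFS =====

theorem pv_intercalate_nil (l : List (List Char)) : List.intercalate [] l = l.flatten := by
  induction l with
  | nil => rfl
  | cons x t ih => cases t <;> simp_all [List.intercalate, List.intersperse]

-- "".join splits over list concatenation
theorem pv_join_append (xs ys : List String) :
    PySem.Str.join "" (xs ++ ys) = PySem.Str.join "" xs ++ PySem.Str.join "" ys := by
  apply String.toList_inj.mp
  simp [PySem.Str.toList_join, PySem.Chars.join, pv_intercalate_nil]

theorem pv_join_singleton (s : String) : PySem.Str.join "" [s] = s := by
  apply String.toList_inj.mp
  simp [PySem.Str.toList_join, PySem.Chars.join, pv_intercalate_nil]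

theorem pv_flatten_map_singleton {α β : Type} (l : List α) (f : α → β) :
    (List.map (fun x => [f x]) l).flatten = List.map f l := by
  induction l with
  | nil => rfl
  | cons x t ih => simp [ih]

-- get? over the setdefault fold is the first match in the list
theorem pv_get_setdefault_fold (l : List (String × List (String × String)))
    (d : PySem.Dict String (List (String × String))) (n : String) :
    (l.foldl (fun d p => d.setdefault p.1 p.2) d).get? n
      = (d.get? n).or ((l.find? (fun p => p.1 == n)).map (fun p => p.2)) := by
  induction l generalizing d with
  | nil => simp
  | cons x t ih =>
    simp only [List.foldl_cons, ih, List.find?_cons]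
    by_cases hc : d.contains x.1
    · have hg : (d.get? x.1).isSome := by rw [← PySem.Dict.contains_eq_isSome_get?]; exact hc
      simp only [PySem.Dict.setdefault, hc, if_pos]
      by_cases hx : (x.1 == n)
      · simp_all
        obtain ⟨v, hv⟩ := Option.isSome_iff_exists.mp hg
        subst hx; simp [hv]
      · simp [hx]
    · have happ : (d.setdefault x.1 x.2) = PySem.Dict.mk (d.items ++ [(x.1, x.2)]) := by
        simp [PySem.Dict.setdefault, hc]
      have hget : (PySem.Dict.mk (d.items ++ [(x.1, x.2)]) : PySem.Dict String (List (String × String))).get? n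
          = (d.get? n).or (if x.1 == n then some x.2 else none) := by
        cases hxn : (x.1 == n) <;>
          simp [PySem.Dict.get?, List.find?_append, hxn]
      rw [happ, hget]
      cases hxn : (x.1 == n) with
      | false => simp
      | true =>
        have hnone : d.get? n = none := by
          rw [PySem.Dict.get?_eq_none_iff_contains]
          have : x.1 = n := by simpa using hxn
          rw [← this]; simpa using hc
        simp [hnone]

-- the grouped dict's sorted items are the sorted distinct top levels paired with their buckets
theorem pv_sorted_items (sections : List (String × (List (String × String)))) :
    PySem.List.sorted
        (sections.foldl (fun d p => d.modify (pvTop p.1) [] (fun v => v ++ [p.1])) PySem.Dict.empty).items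
        (fun gp => gp.1)
      = (PySem.List.sorted (PySem.Set.ofList (sections.map (fun p => pvTop p.1))) (fun x => x)).map
          (fun g => (g, (sections.filter (fun p => pvTop p.1 == g)).map (fun p => p.1))) := by
  set grouped := sections.foldl (fun d p => d.modify (pvTop p.1) [] (fun v => v ++ [p.1])) PySem.Dict.empty with hgrouped
  have hkeys : grouped.keys = PySem.Set.ofList (sections.map (fun p => pvTop p.1)) := by
    rw [hgrouped, PySem.Dict.keys_foldl_modify_key sections (fun p => pvTop p.1) [] (fun _ p v => v ++ [p.1])]
    simp [PySem.Set.update, PySem.Set.ofList, PySem.Dict.keys_empty]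
  have hnodup : grouped.keys.Nodup := by
    rw [hgrouped]
    exact PySem.Dict.nodup_keys_foldl_modify_key sections (fun p => pvTop p.1) [] (fun _ p v => v ++ [p.1]) _
      (by simp [PySem.Dict.keys_empty])
  have hGd : ∀ g, grouped.getD g [] = (sections.filter (fun p => pvTop p.1 == g)).map (fun p => p.1) := by
    intro g
    have hfold : (List.foldl (fun d p => d.modify (pvTop p.1) [] fun v => v ++ [p.1]) PySem.Dict.empty sections)
        = List.foldl (fun (d : PySem.Dict String (List String)) (q : String × String) => d.modify q.1 [] (fun v => v ++ [q.2]))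
            PySem.Dict.empty (sections.map (fun p => (pvTop p.1, p.1))) := by
      rw [List.foldl_map]
    rw [hgrouped, hfold, PySem.Dict.getD_foldl_modify_append]
    simp [List.filter_map, Function.comp_def]
  have hitems : grouped.items = grouped.keys.map (fun k => (k, grouped.getD k [])) := by
    conv_lhs => rw [show grouped.items = grouped.items.map id from (List.map_id _).symm]
    rw [show grouped.keys = grouped.items.map (fun p => p.1) from rfl, List.map_map]
    apply List.map_congr_left
    intro p hp
    have := PySem.Dict.getD_of_mem_items grouped (k := p.1) (v := p.2) (by simpa using hp) hnodup []
    simp [Function.comp, this]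
  apply PySem.List.sorted_eq_of_perm_of_pairwise_lt
  · have h1 : (PySem.List.sorted (PySem.Set.ofList (sections.map (fun p => pvTop p.1))) (fun x => x)).Perm grouped.keys := by
      rw [hkeys]; exact PySem.List.sorted_perm _ _ _
    have h2 := h1.map (fun g => (g, (sections.filter (fun p => pvTop p.1 == g)).map (fun p => p.1)))
    refine h2.trans ?_
    rw [hitems]
    apply List.Perm.of_eq
    apply List.map_congr_left
    intro k _
    rw [hGd]
  · rw [List.pairwise_map]
    exact PySem.List.sorted_ofList_pairwise_lt _

-- proof-side descriptions of A's loops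
def pvEntryA (sections : List (String × (List (String × String)))) (n : String) : String :=
  "- [" ++ n ++ "](#" ++ pvAnchor n ++ ") (" ++
    PySem.Int.toStr (((PySem.Dict.ofList (((sections.find? (fun q => q.1 == n)).map (fun q => q.2)).getD [])).size : Nat) : Int) ++ " files)\n"

def pvGA (sections : List (String × (List (String × String)))) (gp : String × List String) : List String :=
  ["### " ++ gp.1 ++ "\n\n"] ++ (PySem.List.sorted gp.2 (fun x => x)).map (pvEntryA sections) ++ ["\n"]

theorem pv_foldl_groupA (sections : List (String × (List (String × String))))
    (l : List (String × List String)) (init : List String) :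
    l.foldl (pvStepGroupA sections) init = init ++ l.flatMap (pvGA sections) := by
  rw [PySem.List.foldl_congr_mem l _ (fun acc gp => acc ++ pvGA sections gp) init ?_]
  · exact PySem.List.foldl_append_eq_flatMap _ _ _
  · intro acc gp _
    have hn : pvStepNameA sections = fun acc n => acc ++ [pvEntryA sections n] := rfl
    simp only [pvStepGroupA, hn, PySem.List.foldl_append_singleton_eq_map, pvGA]
    simp

theorem pv_foldl_sectionA (aD : PySem.Dict String String)
    (l : List (String × List (String × String))) (init : List String) :
    l.foldl (pvStepSectionA aD) init = init ++ l.flatMap (pvBlock aD) := by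
  rw [PySem.List.foldl_congr_mem l _ (fun acc p => acc ++ pvBlock aD p) init ?_]
  · exact PySem.List.foldl_append_eq_flatMap _ _ _
  · intro acc p _
    cases h : aD.get? p.1 <;>
      simp [pvStepSectionA, pvBlock, h, pv_flatten_map_singleton]

-- ===== VERDICT (by name: the statement is the Claim_ definition above) =====
theorem create_section_index_spec : Claim_equal_create_section_index := by
  intro sections analyses _
  show create_section_index sections analyses = create_section_index_alt sections analyses
  unfold create_section_index create_section_index_alt
  simp only [pv_foldl_groupA, pv_foldl_sectionA, PySem.List.foldl_append_eq_flatMap,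
    pv_sorted_items, List.flatMap_map, List.nil_append]
  have hentry : (fun g => pvGA sections (g, (sections.filter (fun p => pvTop p.1 == g)).map (fun p => p.1)))
      = (fun g => ["### " ++ g ++ "\n\n"]
          ++ (PySem.List.sorted ((sections.filter (fun p => pvTop p.1 == g)).map (fun p => p.1)) (fun x => x)).map
              (fun n => "- [" ++ n ++ "](#" ++ pvAnchor n ++ ") (" ++
                PySem.Int.toStr ((((PySem.Dict.ofList (((sections.foldl (fun d p => d.setdefault p.1 p.2) PySem.Dict.empty).get? n).getD [])).size : Nat) : Int)) ++ " files)\n")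
          ++ ["\n"]) := by
    funext g
    simp [pvGA, pvEntryA, pv_get_setdefault_fold]
  rw [hentry]
  simp only [pv_join_append, pv_join_singleton]
  rw [show ("# Repository Analysis Index\n\n## Sections\n\n" : String)
      = "# Repository Analysis Index\n\n" ++ "## Sections\n\n" from rfl]
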